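-- pv_equiv track=rewrite | github.com/mark1ry/AoC-25 | day_04/paper_rolls.py | count_forkable_rolls
-- ===== SOURCE A (Python) =====
-- import copy
--
-- def is_forkable(map: list, idx_x: int, idx_y: int) -> bool:
--
--     len_y = len(map)
--     len_x = len(map[0])
--
--     top_edge = False
--     bottom_edge = False
--     left_edge = False
--     right_edge = False
--
--     if idx_y==0:
--         top_edge = True
--     if idx_y==(len_y-1):
--         bottom_edge = True
--     if idx_x==0:
--         left_edge = True
--     if idx_x==(len_x-1):
--         right_edge = True
--
--     adjacent_rolls = 0
--     if (not top_edge) and (not left_edge):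
--         adjacent_rolls += map[idx_y-1][idx_x-1]
--     if not top_edge:
--         adjacent_rolls += map[idx_y-1][idx_x]
--     if (not top_edge) and (not right_edge):
--         adjacent_rolls += map[idx_y-1][idx_x+1]
--     if not right_edge:
--         adjacent_rolls += map[idx_y][idx_x+1]
--     if (not bottom_edge) and (not right_edge):
--         adjacent_rolls += map[idx_y+1][idx_x+1]
--     if not bottom_edge:
--         adjacent_rolls += map[idx_y+1][idx_x]
--     if (not bottom_edge) and (not left_edge):
--         adjacent_rolls += map[idx_y+1][idx_x-1]
--     if not left_edge:
--         adjacent_rolls += map[idx_y][idx_x-1]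
--
--     if adjacent_rolls<4:
--         return True
--     return False
--
-- def count_forkable_rolls(map: list) -> list:
--
--     forkable_rolls = []
--     rolls_removed_in_run = 1
--     temp = copy.deepcopy(map)
--
--     while rolls_removed_in_run>0:
--         rolls_removed_in_run = 0
--         for idx_y, file in enumerate(map):
--             for idx_x, element in enumerate(file):
--                 if element:
--                     forkable = is_forkable(map, idx_x, idx_y)
--                     if forkable:
--                         rolls_removed_in_run += 1
--                         temp[idx_y][idx_x] = 0
--         forkable_rolls.append(rolls_removed_in_run)
--         map = copy.deepcopy(temp)
--     return forkable_rolls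
-- ===== SOURCE B (Python) =====
-- def count_forkable_rolls(map: list) -> list:
--     h = len(map)
--     w = len(map[0]) if map else 0
--     grid = [row[:] for row in map]
--     offs = [(-1, -1), (-1, 0), (-1, 1), (0, -1), (0, 1), (1, -1), (1, 0), (1, 1)]
--     counts = []
--     # worklist peeling: after the first full scan, only cells adjacent to a
--     # removal can change status, so each round re-checks only those.
--     cand = {(y, x) for y in range(h) for x in range(w)}
--     while True:
--         removed = [(y, x) for (y, x) in cand
--                    if grid[y][x] != 0
--                    and sum(grid[y + dy][x + dx] for dy, dx in offs
--                            if 0 <= y + dy < h and 0 <= x + dx < w) < 4]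
--         counts.append(len(removed))
--         if not removed:
--             return counts
--         for (y, x) in removed:
--             grid[y][x] = 0
--         cand = {(y + dy, x + dx) for (y, x) in removed for dy, dx in offs
--                 if 0 <= y + dy < h and 0 <= x + dx < w}
-- ===== Notes on version B (the rewrite author's own statement) =====
-- stated objective: faster
-- what changed: B replaces A's full-grid rescan every round by worklist peeling: neighbour sums are checked for all cells only once, and each later round re-checks only the cells adjacent to the previous round's removals (the only cells whose status can change), so total work is proportional to the grid plus the removals instead of rounds times grid.
-- outside the precondition, e.g. on count_forkable_rolls([[1], [0, 0]]): A returns [1, 0], B returns [1, 0]; on count_forkable_rolls([[1, 1], [1]]): A raises IndexError, B raises IndexError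
import Mathlib
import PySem

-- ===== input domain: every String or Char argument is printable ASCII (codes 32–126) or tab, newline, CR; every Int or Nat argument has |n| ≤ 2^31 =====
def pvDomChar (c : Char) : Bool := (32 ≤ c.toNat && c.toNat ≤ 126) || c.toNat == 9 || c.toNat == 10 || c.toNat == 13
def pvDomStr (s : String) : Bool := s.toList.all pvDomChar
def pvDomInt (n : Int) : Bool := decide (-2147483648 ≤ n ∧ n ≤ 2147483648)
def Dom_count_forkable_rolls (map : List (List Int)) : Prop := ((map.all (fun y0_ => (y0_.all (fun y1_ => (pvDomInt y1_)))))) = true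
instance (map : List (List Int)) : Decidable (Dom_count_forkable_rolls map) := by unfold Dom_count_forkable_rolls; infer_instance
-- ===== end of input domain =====

-- B replaces A's full-grid rescan per round by worklist peeling: after one initial scan it
-- re-checks, each round, only the cells adjacent to the previous round's removals (a cell's
-- status can change only there), which removes A's per-round O(N) pass.

-- ===== PORT A =====
-- map[y][x] on in-range indices (Pre_ keeps every access of A in range)
def pvAt (m : List (List Int)) (y x : Int) : Int :=
  ((PySem.List.pyGet? ((PySem.List.pyGet? m y).getD []) x)).getD 0

def is_forkable (map : List (List Int)) (idx_x idx_y : Int) : Bool :=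
  let len_y : Int := (map.length : Int)
  let len_x : Int := (((PySem.List.pyGet? map 0).getD []).length : Int)
  let top_edge : Bool := idx_y == 0
  let bottom_edge : Bool := idx_y == len_y - 1
  let left_edge : Bool := idx_x == 0
  let right_edge : Bool := idx_x == len_x - 1
  let a : Int := 0
  let a := if !top_edge && !left_edge then a + pvAt map (idx_y-1) (idx_x-1) else a
  let a := if !top_edge then a + pvAt map (idx_y-1) idx_x else a
  let a := if !top_edge && !right_edge then a + pvAt map (idx_y-1) (idx_x+1) else a
  let a := if !right_edge then a + pvAt map idx_y (idx_x+1) else a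
  let a := if !bottom_edge && !right_edge then a + pvAt map (idx_y+1) (idx_x+1) else a
  let a := if !bottom_edge then a + pvAt map (idx_y+1) idx_x else a
  let a := if !bottom_edge && !left_edge then a + pvAt map (idx_y+1) (idx_x-1) else a
  let a := if !left_edge then a + pvAt map idx_y (idx_x-1) else a
  a < 4

-- one pass of A's while-body: (cells removed, temp)
def pvRoundA (m : List (List Int)) : Int × List (List Int) :=
  (PySem.List.enumerate m 0).foldl (fun st p =>
    (PySem.List.enumerate p.2 0).foldl (fun st2 q =>
      if q.2 ≠ 0 then
        (if is_forkable m q.1 p.1 then (st2.1 + 1, st2.2.modify p.1.toNat (fun r => r.set q.1.toNat 0))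
         else st2)
      else st2) st) ((0 : Int), m)

-- totality fuel for the while-loop (each productive round zeroes ≥ 1 nonzero cell, so it suffices)
def pvFuel (m : List (List Int)) : Nat := (m.map (fun r => r.countP (fun e => e ≠ 0))).sum + 1

def pvLoopA : Nat → List (List Int) → List Int → List Int
  | 0, _, acc => acc
  | f+1, m, acc =>
    let st := pvRoundA m
    let acc2 := acc ++ [st.1]
    if st.1 > 0 then pvLoopA f st.2 acc2 else acc2

def count_forkable_rolls (map : List (List Int)) : List Int :=
  pvLoopA (pvFuel map) map []

-- ===== PORT B =====
-- the 8 neighbour offsets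
def pvOffs : List (Int × Int) := [(-1,-1),(-1,0),(-1,1),(0,-1),(0,1),(1,-1),(1,0),(1,1)]

-- (grid[y][x] is read via pvAt, the same indexing primitive as in port A)
-- sum(grid[y+dy][x+dx] for dy, dx in offs if 0 <= y+dy < h and 0 <= x+dx < w)
def pvNbSum (grid : List (List Int)) (h w y x : Int) : Int :=
  ((pvOffs.filter (fun d => decide (0 ≤ y + d.1 ∧ y + d.1 < h ∧ 0 ≤ x + d.2 ∧ x + d.2 < w))).map
    (fun d => pvAt grid (y + d.1) (x + d.2))).sum

-- removed = [(y, x) for (y, x) in cand if grid[y][x] != 0 and <neighbour sum> < 4]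
def pvRemovedB (grid : List (List Int)) (h w : Int) (cand : PySem.Set (Int × Int)) : List (Int × Int) :=
  cand.filter (fun c => decide (pvAt grid c.1 c.2 ≠ 0 ∧ pvNbSum grid h w c.1 c.2 < 4))

-- for (y, x) in removed: grid[y][x] = 0
def pvZero (removed : List (Int × Int)) (grid : List (List Int)) : List (List Int) :=
  removed.foldl (fun g c => g.modify c.1.toNat (fun r => r.set c.2.toNat 0)) grid

-- cand = {(y+dy, x+dx) for (y, x) in removed for dy, dx in offs if in range}
def pvNextCand (removed : List (Int × Int)) (h w : Int) : PySem.Set (Int × Int) :=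
  PySem.Set.ofList (removed.flatMap (fun c =>
    (pvOffs.filter (fun d => decide (0 ≤ c.1 + d.1 ∧ c.1 + d.1 < h ∧ 0 ≤ c.2 + d.2 ∧ c.2 + d.2 < w))).map
      (fun d => (c.1 + d.1, c.2 + d.2))))

def pvLoopB : Nat → List (List Int) → Int → Int → PySem.Set (Int × Int) → List Int → List Int
  | 0, _, _, _, _, counts => counts
  | f+1, grid, h, w, cand, counts =>
    let removed := pvRemovedB grid h w cand
    let counts2 := counts ++ [(removed.length : Int)]
    if removed.isEmpty then counts2
    else pvLoopB f (pvZero removed grid) h w (pvNextCand removed h w) counts2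

def count_forkable_rolls_alt (map : List (List Int)) : List Int :=
  let h : Int := (map.length : Int)
  let w : Int := if map.isEmpty then 0 else ((map.headD []).length : Int)
  let grid := map.map (fun row => row)
  let cand0 : PySem.Set (Int × Int) :=
    PySem.Set.ofList ((PySem.List.pyRange 0 h 1).flatMap (fun y =>
      (PySem.List.pyRange 0 w 1).map (fun x => (y, x))))
  pvLoopB (pvFuel map) grid h w cand0 []

-- ===== PRECONDITION & SPEC =====
-- Pre_ excludes ragged grids (rows of unequal length): there A either raises IndexError on a
-- neighbour access past a short row, or (when the stray cells are zero) returns a value only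
-- accidentally, reading neighbours at offsets taken from row 0's length.
def Pre_count_forkable_rolls (map : List (List Int)) : Prop :=
  ∀ r ∈ map, r.length = (map.headD []).length

instance (map : List (List Int)) : Decidable (Pre_count_forkable_rolls map) := by
  unfold Pre_count_forkable_rolls; infer_instance

def pvWitness_count_forkable_rolls : List (List Int) := [[1, 0, 2], [0, 5, 1], [1, 1, 1]]

def Spec_count_forkable_rolls (map : List (List Int)) (out : List Int) : Prop :=
  out = count_forkable_rolls_alt map
instance (map : List (List Int)) (out : List Int) : Decidable (Spec_count_forkable_rolls map out) := by
  unfold Spec_count_forkable_rolls; infer_instance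

-- ===== CLAIM (what is proved, stated in full; the proofs are below) =====
def Claim_equal_count_forkable_rolls : Prop := ∀ (map : List (List Int)), Dom_count_forkable_rolls map → Pre_count_forkable_rolls map → Spec_count_forkable_rolls map (count_forkable_rolls map)

-- ===== LEMMAS AND PROOFS =====

-- value of cell (y,x) with everything outside the grid reading 0
def pvPad (m : List (List Int)) (y x : Int) : Int :=
  if 0 ≤ y ∧ 0 ≤ x then (m.getD y.toNat []).getD x.toNat 0 else 0

-- the sum of the 8 neighbours of (y,x)
def pvNeigh (m : List (List Int)) (y x : Int) : Int :=
  pvPad m (y-1) (x-1) + pvPad m (y-1) x + pvPad m (y-1) (x+1) + pvPad m y (x+1) +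
  pvPad m (y+1) (x+1) + pvPad m (y+1) x + pvPad m (y+1) (x-1) + pvPad m y (x-1)

-- A's removal condition and the grid/count of one round of A, in map form
abbrev pvCA (m : List (List Int)) (x y e : Int) : Prop := e ≠ 0 ∧ is_forkable m x y = true

def pvGridA (m : List (List Int)) : List (List Int) :=
  (PySem.List.enumerate m 0).map (fun p =>
    (PySem.List.enumerate p.2 0).map (fun q => if pvCA m q.1 p.1 q.2 then 0 else q.2))

def pvCntA (m : List (List Int)) : Int :=
  ((PySem.List.enumerate m 0).map (fun p =>
    ((PySem.List.enumerate p.2 0).countP (fun q => decide (pvCA m q.1 p.1 q.2)) : Int))).sum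

-- cells in range / cells a round removes, as predicates on a coordinate pair
def pvInR (h w : Int) (c : Int × Int) : Prop := 0 ≤ c.1 ∧ c.1 < h ∧ 0 ≤ c.2 ∧ c.2 < w

def pvQual (m : List (List Int)) (c : Int × Int) : Prop :=
  pvPad m c.1 c.2 ≠ 0 ∧ pvNeigh m c.1 c.2 < 4

-- the qualifying cells of a round, listed row-major (A removes exactly these)
def pvQL (m : List (List Int)) : List (Int × Int) :=
  (PySem.List.enumerate m 0).flatMap (fun p =>
    ((PySem.List.enumerate p.2 0).filter (fun q => decide (pvCA m q.1 p.1 q.2))).map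
      (fun q => (p.1, q.1)))

lemma pv_foldl_ite_modify {β : Type} (y : Nat) (l : List β) (C : β → Prop) [DecidablePred C]
    (G : β → List Int → List Int) (t0 : List (List Int)) :
    l.foldl (fun t q => if C q then t.modify y (G q) else t) t0
      = t0.modify y (fun r => l.foldl (fun r q => if C q then G q r else r) r) := by
  induction l generalizing t0 with
  | nil => simp [List.foldl_nil]; exact (List.modify_id y t0).symm
  | cons a l ih =>
    simp only [List.foldl_cons]
    by_cases h : C a
    · simp only [h, if_pos]
      rw [ih, List.modify_modify_eq]
      rfl
    · simp only [h, if_neg, not_false_iff]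
      rw [ih]

lemma pv_modify_append {α : Type} (done : List α) (r : α) (rest : List α) (f : α → α) :
    (done ++ r :: rest).modify done.length f = done ++ f r :: rest := by
  induction done with
  | nil => simp [List.modify_zero_cons]
  | cons a d ih => simp [List.modify_succ_cons, ih]

lemma pv_foldl_enum_modify (R : Int → List Int → List Int → List Int) :
    ∀ (rest done : List (List Int)),
      (PySem.List.enumerate rest (done.length : Int)).foldl
          (fun t p => t.modify p.1.toNat (R p.1 p.2)) (done ++ rest)
        = done ++ (PySem.List.enumerate rest (done.length : Int)).map (fun p => R p.1 p.2 p.2) := by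
  intro rest
  induction rest with
  | nil => intro done; simp [PySem.List.enumerate_nil]
  | cons r rest ih =>
    intro done
    rw [PySem.List.enumerate_cons]
    simp only [List.foldl_cons, List.map_cons]
    have h1 : ((done.length : Int)).toNat = done.length := by omega
    rw [h1, pv_modify_append]
    have h2 : (done.length : Int) + 1 = ((done ++ [R (done.length : Int) r r]).length : Int) := by
      simp
    have h3 : done ++ R (done.length : Int) r r :: rest
        = (done ++ [R (done.length : Int) r r]) ++ rest := by simp
    rw [h3, h2, ih]
    simp

lemma pv_set_append {α : Type} (done : List α) (r : α) (rest : List α) (v : α) :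
    (done ++ r :: rest).set done.length v = done ++ v :: rest := by
  rw [List.set_eq_modify, pv_modify_append]

lemma pv_foldl_enum_set (C : Int → Int → Prop) [∀ a b, Decidable (C a b)] :
    ∀ (rest done : List Int),
      (PySem.List.enumerate rest (done.length : Int)).foldl
          (fun r q => if C q.1 q.2 then r.set q.1.toNat 0 else r) (done ++ rest)
        = done ++ (PySem.List.enumerate rest (done.length : Int)).map
            (fun q => if C q.1 q.2 then 0 else q.2) := by
  intro rest
  induction rest with
  | nil => intro done; simp [PySem.List.enumerate_nil]
  | cons e rest ih =>
    intro done
    rw [PySem.List.enumerate_cons]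
    simp only [List.foldl_cons, List.map_cons]
    have h1 : ((done.length : Int)).toNat = done.length := by omega
    by_cases h : C (done.length : Int) e
    · simp only [h, if_pos]
      rw [h1, pv_set_append]
      have h3 : done ++ (0:Int) :: rest = (done ++ [(0:Int)]) ++ rest := by simp
      have h2 : (done.length : Int) + 1 = (((done ++ [(0:Int)])).length : Int) := by simp
      rw [h3, h2, ih]
      simp
    · simp only [h, if_neg, not_false_iff]
      have h3 : done ++ e :: rest = (done ++ [e]) ++ rest := by simp
      have h2 : (done.length : Int) + 1 = (((done ++ [e])).length : Int) := by simp
      rw [h3, h2, ih]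
      simp

lemma pv_innerA (m : List (List Int)) (y : Int) (row : List Int) (st : Int × List (List Int)) :
    (PySem.List.enumerate row 0).foldl (fun st2 q =>
        if q.2 ≠ 0 then
          (if is_forkable m q.1 y then (st2.1 + 1, st2.2.modify y.toNat (fun r => r.set q.1.toNat 0))
           else st2)
        else st2) st
      = (st.1 + ((PySem.List.enumerate row 0).countP (fun q => decide (pvCA m q.1 y q.2)) : Int),
         st.2.modify y.toNat (fun r =>
           (PySem.List.enumerate row 0).foldl
             (fun r q => if pvCA m q.1 y q.2 then r.set q.1.toNat 0 else r) r)) := by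
  have hstep : (fun (st2 : Int × List (List Int)) (q : Int × Int) =>
        if q.2 ≠ 0 then
          (if is_forkable m q.1 y then (st2.1 + 1, st2.2.modify y.toNat (fun r => r.set q.1.toNat 0))
           else st2)
        else st2)
      = fun st2 q => (if pvCA m q.1 y q.2 then st2.1 + 1 else st2.1,
          if pvCA m q.1 y q.2 then st2.2.modify y.toNat (fun r => r.set q.1.toNat 0) else st2.2) := by
    funext st2 q
    by_cases h1 : q.2 = 0 <;> by_cases h2 : is_forkable m q.1 y <;>
      simp [pvCA, h1, h2]
  rw [hstep, show st = (st.1, st.2) from rfl,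
    PySem.List.foldl_prod_mk (fun c (q : Int × Int) => if pvCA m q.1 y q.2 then c + 1 else c)
      (fun t (q : Int × Int) => if pvCA m q.1 y q.2 then t.modify y.toNat (fun r => r.set q.1.toNat 0) else t)
      (PySem.List.enumerate row 0) st.1 st.2]
  rw [PySem.List.foldl_ite_add_one]
  rw [pv_foldl_ite_modify y.toNat _ (fun q : Int × Int => pvCA m q.1 y q.2) (fun q r => r.set q.1.toNat 0)]

lemma pvRoundA_eq (m : List (List Int)) : pvRoundA m = (pvCntA m, pvGridA m) := by
  unfold pvRoundA pvCntA pvGridA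
  have hstep : (fun (st : Int × List (List Int)) (p : Int × List Int) =>
      (PySem.List.enumerate p.2 0).foldl (fun st2 q =>
        if q.2 ≠ 0 then
          (if is_forkable m q.1 p.1 then (st2.1 + 1, st2.2.modify p.1.toNat (fun r => r.set q.1.toNat 0))
           else st2)
        else st2) st)
    = fun st p => (st.1 + ((PySem.List.enumerate p.2 0).countP (fun q => decide (pvCA m q.1 p.1 q.2)) : Int),
        st.2.modify p.1.toNat (fun r =>
          (PySem.List.enumerate p.2 0).foldl
            (fun r q => if pvCA m q.1 p.1 q.2 then r.set q.1.toNat 0 else r) r)) := by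
    funext st p
    exact pv_innerA m p.1 p.2 st
  rw [hstep,
    PySem.List.foldl_prod_mk
      (fun c (p : Int × List Int) => c + ((PySem.List.enumerate p.2 0).countP (fun q => decide (pvCA m q.1 p.1 q.2)) : Int))
      (fun t (p : Int × List Int) => t.modify p.1.toNat (fun r =>
          (PySem.List.enumerate p.2 0).foldl
            (fun r q => if pvCA m q.1 p.1 q.2 then r.set q.1.toNat 0 else r) r))
      (PySem.List.enumerate m 0) 0 m]
  simp only [Prod.mk.injEq]
  constructor
  case _ =>
    rw [PySem.List.foldl_add (g := fun (p : Int × List Int) => ((PySem.List.enumerate p.2 0).countP (fun q => decide (pvCA m q.1 p.1 q.2)) : Int))]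
    simp
  case _ =>
    have h := pv_foldl_enum_modify (R := fun y row r =>
      (PySem.List.enumerate row 0).foldl (fun r q => if pvCA m q.1 y q.2 then r.set q.1.toNat 0 else r) r) m []
    simp only [List.nil_append, List.length_nil, Nat.cast_zero] at h
    rw [h]
    apply List.map_congr_left
    intro p _
    have h2 := pv_foldl_enum_set (C := fun a b => pvCA m a p.1 b) p.2 []
    simpa using h2

lemma pvPad_neg (m : List (List Int)) (y x : Int) (h : y < 0 ∨ x < 0) : pvPad m y x = 0 := by
  unfold pvPad; rw [if_neg]; omega

lemma pvPad_row_oob (m : List (List Int)) (y x : Int) (h : (m.length : Int) ≤ y) :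
    pvPad m y x = 0 := by
  unfold pvPad
  split
  · have h0 : m.getD y.toNat [] = [] := List.getD_eq_default _ _ (by omega)
    rw [h0]
    simp
  · rfl

lemma pvPad_col_oob (m : List (List Int)) (hm : Pre_count_forkable_rolls m) (y x : Int)
    (h : ((m.headD []).length : Int) ≤ x) : pvPad m y x = 0 := by
  unfold pvPad
  split
  · by_cases hlt : y.toNat < m.length
    · have h0 : m.getD y.toNat [] = m[y.toNat]'hlt := List.getD_eq_getElem _ _ hlt
      rw [h0]
      have h1 := hm _ (List.getElem_mem hlt)
      rw [List.getD_eq_default _ _ (by omega)]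
    · have h0 : m.getD y.toNat [] = [] := List.getD_eq_default _ _ (by omega)
      rw [h0]
      simp
  · rfl

lemma pvPad_in (m : List (List Int)) (y x : Nat) (hy : y < m.length) (hx : x < (m[y]'hy).length) :
    pvPad m (y : Int) (x : Int) = (m[y]'hy)[x]'hx := by
  unfold pvPad
  rw [if_pos (by omega)]
  simp [hy, hx]

lemma pvAt_in (m : List (List Int)) (y x : Nat) (hy : y < m.length) (hx : x < (m[y]'hy).length) :
    pvAt m (y : Int) (x : Int) = (m[y]'hy)[x]'hx := by
  unfold pvAt
  simp only [PySem.List.pyGet?_natCast]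
  rw [List.getElem?_eq_getElem hy]
  simp only [Option.getD_some]
  rw [List.getElem?_eq_getElem hx]
  rfl

lemma pv_fork_eq (m : List (List Int)) (hm : Pre_count_forkable_rolls m)
    (y x : Nat) (hy : y < m.length) (hx : x < (m.headD []).length) :
    is_forkable m (x : Int) (y : Int) = decide (pvNeigh m (y : Int) (x : Int) < 4) := by
  have hrow : ∀ (k : Nat) (hk : k < m.length), (m[k]'hk).length = (m.headD []).length :=
    fun k hk => hm _ (List.getElem_mem hk)
  have hxy : x < (m[y]'hy).length := by rw [hrow y hy]; exact hx
  have hlenx : (((PySem.List.pyGet? m 0).getD []).length) = (m.headD []).length := by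
    cases m with
    | nil => simp at hy
    | cons a t => simp
  have hsplit : ∀ (c : Bool) (acc t : Int), (if c then acc + t else acc) = acc + (if c then t else 0) := by
    intro c acc t; cases c <;> simp
  simp only [is_forkable, hlenx, hsplit]
  have e1 : (if (!((y:Int) == 0) && !((x:Int) == 0)) then pvAt m ((y:Int)-1) ((x:Int)-1) else 0)
      = pvPad m ((y:Int)-1) ((x:Int)-1) := by
    by_cases h1 : y = 0
    · subst h1; rw [pvPad_neg m _ _ (by omega)]; simp
    · by_cases h2 : x = 0
      · subst h2; rw [pvPad_neg m _ _ (by omega)]; simp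
      · have g1 : ((y:Int) == 0) = false := by simp only [beq_eq_false_iff_ne, ne_eq]; omega
        have g2 : ((x:Int) == 0) = false := by simp only [beq_eq_false_iff_ne, ne_eq]; omega
        rw [g1, g2]
        simp only [Bool.not_false, Bool.and_self, if_true]
        rw [show (y:Int)-1 = ((y-1 : Nat) : Int) by omega,
            show (x:Int)-1 = ((x-1 : Nat) : Int) by omega,
            pvAt_in m (y-1) (x-1) (by omega) (by rw [hrow]; omega),
            pvPad_in m (y-1) (x-1) (by omega) (by rw [hrow]; omega)]
  have e2 : (if !((y:Int) == 0) then pvAt m ((y:Int)-1) (x:Int) else 0)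
      = pvPad m ((y:Int)-1) (x:Int) := by
    by_cases h1 : y = 0
    · subst h1; rw [pvPad_neg m _ _ (by omega)]; simp
    · have g1 : ((y:Int) == 0) = false := by simp only [beq_eq_false_iff_ne, ne_eq]; omega
      rw [g1]
      simp only [Bool.not_false, if_true]
      rw [show (y:Int)-1 = ((y-1 : Nat) : Int) by omega,
          pvAt_in m (y-1) x (by omega) (by rw [hrow]; omega),
          pvPad_in m (y-1) x (by omega) (by rw [hrow]; omega)]
  have e3 : (if (!((y:Int) == 0) && !((x:Int) == ((m.headD []).length : Int) - 1)) then pvAt m ((y:Int)-1) ((x:Int)+1) else 0)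
      = pvPad m ((y:Int)-1) ((x:Int)+1) := by
    by_cases h1 : y = 0
    · subst h1; rw [pvPad_neg m _ _ (by omega)]; simp
    · by_cases h2 : x = (m.headD []).length - 1
      · have g2 : ((x:Int) == ((m.headD []).length : Int) - 1) = true := by simp only [beq_iff_eq]; omega
        rw [g2, pvPad_col_oob m hm _ _ (by omega)]
        simp
      · have g1 : ((y:Int) == 0) = false := by simp only [beq_eq_false_iff_ne, ne_eq]; omega
        have g2 : ((x:Int) == ((m.headD []).length : Int) - 1) = false := by simp only [beq_eq_false_iff_ne, ne_eq]; omega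
        rw [g1, g2]
        simp only [Bool.not_false, Bool.and_self, if_true]
        rw [show (y:Int)-1 = ((y-1 : Nat) : Int) by omega,
            show (x:Int)+1 = ((x+1 : Nat) : Int) by omega,
            pvAt_in m (y-1) (x+1) (by omega) (by rw [hrow]; omega),
            pvPad_in m (y-1) (x+1) (by omega) (by rw [hrow]; omega)]
  have e4 : (if !((x:Int) == ((m.headD []).length : Int) - 1) then pvAt m (y:Int) ((x:Int)+1) else 0)
      = pvPad m (y:Int) ((x:Int)+1) := by
    by_cases h2 : x = (m.headD []).length - 1
    · have g2 : ((x:Int) == ((m.headD []).length : Int) - 1) = true := by simp only [beq_iff_eq]; omega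
      rw [g2, pvPad_col_oob m hm _ _ (by omega)]
      simp
    · have g2 : ((x:Int) == ((m.headD []).length : Int) - 1) = false := by simp only [beq_eq_false_iff_ne, ne_eq]; omega
      rw [g2]
      simp only [Bool.not_false, if_true]
      rw [show (x:Int)+1 = ((x+1 : Nat) : Int) by omega,
          pvAt_in m y (x+1) hy (by rw [hrow]; omega),
          pvPad_in m y (x+1) hy (by rw [hrow]; omega)]
  have e5 : (if (!((y:Int) == (m.length : Int) - 1) && !((x:Int) == ((m.headD []).length : Int) - 1)) then pvAt m ((y:Int)+1) ((x:Int)+1) else 0)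
      = pvPad m ((y:Int)+1) ((x:Int)+1) := by
    by_cases h1 : y = m.length - 1
    · have g1 : ((y:Int) == (m.length : Int) - 1) = true := by simp only [beq_iff_eq]; omega
      rw [g1, pvPad_row_oob m _ _ (by omega)]
      simp
    · by_cases h2 : x = (m.headD []).length - 1
      · have g2 : ((x:Int) == ((m.headD []).length : Int) - 1) = true := by simp only [beq_iff_eq]; omega
        rw [g2, pvPad_col_oob m hm _ _ (by omega)]
        simp
      · have g1 : ((y:Int) == (m.length : Int) - 1) = false := by simp only [beq_eq_false_iff_ne, ne_eq]; omega
        have g2 : ((x:Int) == ((m.headD []).length : Int) - 1) = false := by simp only [beq_eq_false_iff_ne, ne_eq]; omega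
        rw [g1, g2]
        simp only [Bool.not_false, Bool.and_self, if_true]
        rw [show (y:Int)+1 = ((y+1 : Nat) : Int) by omega,
            show (x:Int)+1 = ((x+1 : Nat) : Int) by omega,
            pvAt_in m (y+1) (x+1) (by omega) (by rw [hrow]; omega),
            pvPad_in m (y+1) (x+1) (by omega) (by rw [hrow]; omega)]
  have e6 : (if !((y:Int) == (m.length : Int) - 1) then pvAt m ((y:Int)+1) (x:Int) else 0)
      = pvPad m ((y:Int)+1) (x:Int) := by
    by_cases h1 : y = m.length - 1
    · have g1 : ((y:Int) == (m.length : Int) - 1) = true := by simp only [beq_iff_eq]; omega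
      rw [g1, pvPad_row_oob m _ _ (by omega)]
      simp
    · have g1 : ((y:Int) == (m.length : Int) - 1) = false := by simp only [beq_eq_false_iff_ne, ne_eq]; omega
      rw [g1]
      simp only [Bool.not_false, if_true]
      rw [show (y:Int)+1 = ((y+1 : Nat) : Int) by omega,
          pvAt_in m (y+1) x (by omega) (by rw [hrow]; omega),
          pvPad_in m (y+1) x (by omega) (by rw [hrow]; omega)]
  have e7 : (if (!((y:Int) == (m.length : Int) - 1) && !((x:Int) == 0)) then pvAt m ((y:Int)+1) ((x:Int)-1) else 0)
      = pvPad m ((y:Int)+1) ((x:Int)-1) := by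
    by_cases h1 : y = m.length - 1
    · have g1 : ((y:Int) == (m.length : Int) - 1) = true := by simp only [beq_iff_eq]; omega
      rw [g1, pvPad_row_oob m _ _ (by omega)]
      simp
    · by_cases h2 : x = 0
      · subst h2; rw [pvPad_neg m _ _ (by omega)]; simp
      · have g1 : ((y:Int) == (m.length : Int) - 1) = false := by simp only [beq_eq_false_iff_ne, ne_eq]; omega
        have g2 : ((x:Int) == 0) = false := by simp only [beq_eq_false_iff_ne, ne_eq]; omega
        rw [g1, g2]
        simp only [Bool.not_false, Bool.and_self, if_true]
        rw [show (y:Int)+1 = ((y+1 : Nat) : Int) by omega,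
            show (x:Int)-1 = ((x-1 : Nat) : Int) by omega,
            pvAt_in m (y+1) (x-1) (by omega) (by rw [hrow]; omega),
            pvPad_in m (y+1) (x-1) (by omega) (by rw [hrow]; omega)]
  have e8 : (if !((x:Int) == 0) then pvAt m (y:Int) ((x:Int)-1) else 0)
      = pvPad m (y:Int) ((x:Int)-1) := by
    by_cases h2 : x = 0
    · subst h2; rw [pvPad_neg m _ _ (by omega)]; simp
    · have g2 : ((x:Int) == 0) = false := by simp only [beq_eq_false_iff_ne, ne_eq]; omega
      rw [g2]
      simp only [Bool.not_false, if_true]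
      rw [show (x:Int)-1 = ((x-1 : Nat) : Int) by omega,
          pvAt_in m y (x-1) hy (by rw [hrow]; omega),
          pvPad_in m y (x-1) hy (by rw [hrow]; omega)]
  rw [e1, e2, e3, e4, e5, e6, e7, e8]
  unfold pvNeigh
  norm_num

-- ---------- rectangularity bookkeeping ----------

lemma pv_rect_pre (m : List (List Int)) (w : Int)
    (hw : ∀ row ∈ m, (row.length : Int) = w) : Pre_count_forkable_rolls m := by
  intro r hr
  cases m with
  | nil => simp at hr
  | cons a t =>
    have ha := hw a (by simp)
    have hrr := hw r hr
    simp only [List.headD_cons]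
    omega

lemma pv_head_w (m : List (List Int)) (w : Int)
    (hw : ∀ row ∈ m, (row.length : Int) = w) (hne : m ≠ []) :
    ((m.headD []).length : Int) = w := by
  cases m with
  | nil => exact absurd rfl hne
  | cons a t => simpa using hw a (by simp)

-- ---------- bridging B's primitives to pvPad / pvNeigh ----------

lemma pvAt_pad_in (m : List (List Int)) (y x : Int)
    (h0 : 0 ≤ y) (h1 : y.toNat < m.length) (h2 : 0 ≤ x)
    (h3 : x.toNat < (m[y.toNat]'h1).length) :
    pvAt m y x = pvPad m y x := by
  unfold pvAt pvPad
  rw [if_pos ⟨h0, h2⟩]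
  rw [PySem.List.pyGet?_of_nonneg _ h0, List.getElem?_eq_getElem h1]
  simp only [Option.getD_some]
  rw [PySem.List.pyGet?_of_nonneg _ h2, List.getElem?_eq_getElem h3]
  simp [h1, h3]

lemma pvNb_term (m : List (List Int)) (h w : Int)
    (hh : (m.length : Int) = h) (hw : ∀ row ∈ m, (row.length : Int) = w) (y x : Int) :
    (if 0 ≤ y ∧ y < h ∧ 0 ≤ x ∧ x < w then pvAt m y x else 0) = pvPad m y x := by
  by_cases hc : 0 ≤ y ∧ y < h ∧ 0 ≤ x ∧ x < w
  · rw [if_pos hc]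
    obtain ⟨c1, c2, c3, c4⟩ := hc
    have hy1 : y.toNat < m.length := by omega
    have hrl := hw (m[y.toNat]'hy1) (List.getElem_mem hy1)
    exact pvAt_pad_in m y x c1 hy1 c3 (by omega)
  · rw [if_neg hc]
    by_cases c1 : 0 ≤ y
    · by_cases c2 : y < h
      · by_cases c3 : 0 ≤ x
        · have c4 : w ≤ x := by omega
          have hne : m ≠ [] := by intro he; subst he; simp at hh; omega
          exact (pvPad_col_oob m (pv_rect_pre m w hw) y x
            (by rw [pv_head_w m w hw hne]; omega)).symm
        · exact (pvPad_neg m y x (by omega)).symm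
      · exact (pvPad_row_oob m y x (by omega)).symm
    · exact (pvPad_neg m y x (by omega)).symm

lemma pv_sum_filter_map {α : Type} (l : List α) (p : α → Prop) [DecidablePred p] (f : α → Int) :
    ((l.filter (fun d => decide (p d))).map f).sum
      = (l.map (fun d => if p d then f d else 0)).sum := by
  induction l with
  | nil => rfl
  | cons a l ih =>
    by_cases h : p a
    · simp [h, ih]
    · simp [h, ih]

lemma pvNbSum_eq (m : List (List Int)) (h w : Int)
    (hh : (m.length : Int) = h) (hw : ∀ row ∈ m, (row.length : Int) = w) (y x : Int) :
    pvNbSum m h w y x = pvNeigh m y x := by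
  unfold pvNbSum
  rw [pv_sum_filter_map]
  have hterm := pvNb_term m h w hh hw
  simp only [pvOffs, List.map_cons, List.map_nil, List.sum_cons, List.sum_nil, hterm]
  have a1 : y + (-1 : Int) = y - 1 := by ring
  have a2 : x + (-1 : Int) = x - 1 := by ring
  have a3 : y + (0 : Int) = y := by ring
  have a4 : x + (0 : Int) = x := by ring
  rw [a1, a2, a3, a4]
  unfold pvNeigh
  ring

lemma pvPredB_iff (m : List (List Int)) (h w : Int)
    (hh : (m.length : Int) = h) (hw : ∀ row ∈ m, (row.length : Int) = w)
    (c : Int × Int) (hc : pvInR h w c) :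
    (decide (pvAt m c.1 c.2 ≠ 0 ∧ pvNbSum m h w c.1 c.2 < 4) = true) ↔ pvQual m c := by
  obtain ⟨c1, c2, c3, c4⟩ := hc
  have hy1 : c.1.toNat < m.length := by omega
  have hrl := hw (m[c.1.toNat]'hy1) (List.getElem_mem hy1)
  rw [decide_eq_true_iff, pvAt_pad_in m c.1 c.2 c1 hy1 c3 (by omega),
    pvNbSum_eq m h w hh hw]
  exact Iff.rfl

-- ---------- the qualifying-cell list of a round ----------

lemma pvCA_iff_qual (m : List (List Int)) (h w : Int)
    (hh : (m.length : Int) = h) (hw : ∀ row ∈ m, (row.length : Int) = w)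
    (k j : Nat) (hk : k < m.length) (hj : j < (m[k]'hk).length) :
    pvCA m (j : Int) (k : Int) ((m[k]'hk)[j]'hj) ↔ pvQual m ((k : Int), (j : Int)) := by
  have hpre := pv_rect_pre m w hw
  have hne : m ≠ [] := by intro he; subst he; simp at hk
  have hwj : ((m[k]'hk).length : Int) = w := hw _ (List.getElem_mem hk)
  have hxh : j < (m.headD []).length := by
    have := pv_head_w m w hw hne
    omega
  unfold pvCA pvQual
  rw [pv_fork_eq m hpre k j hk hxh, decide_eq_true_iff,
    pvPad_in m k j hk hj]

lemma pvQL_len (m : List (List Int)) : pvCntA m = ((pvQL m).length : Int) := by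
  unfold pvCntA pvQL
  rw [List.length_flatMap, Nat.cast_list_sum, List.map_map]
  apply congrArg List.sum
  apply List.map_congr_left
  intro p _
  simp only [Function.comp, List.length_map, ← List.countP_eq_length_filter]

lemma pvQL_nodup (m : List (List Int)) : (pvQL m).Nodup := by
  unfold pvQL
  rw [List.nodup_flatMap]
  constructor
  · intro p _
    have hpw : (((PySem.List.enumerate p.2 0).filter
        (fun q => decide (pvCA m q.1 p.1 q.2)))).Pairwise (fun a b => a.1 < b.1) :=
      List.Pairwise.sublist List.filter_sublist (PySem.List.pairwise_lt_enumerate p.2 0)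
    exact List.Pairwise.map _ (fun a b hab => by
      intro he
      have : a.1 = b.1 := by
        have := congrArg Prod.snd he
        simpa using this
      omega) hpw
  · have hout := PySem.List.pairwise_lt_enumerate m 0
    refine hout.imp ?_
    intro p q hpq a ha hb
    obtain ⟨qa, _, rfl⟩ := List.mem_map.mp ha
    obtain ⟨qb, _, hab⟩ := List.mem_map.mp hb
    have h' := congrArg Prod.fst hab
    simp only [] at h'
    omega

lemma pvQL_mem (m : List (List Int)) (h w : Int)
    (hh : (m.length : Int) = h) (hw : ∀ row ∈ m, (row.length : Int) = w)
    (c : Int × Int) :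
    c ∈ pvQL m ↔ pvInR h w c ∧ pvQual m c := by
  unfold pvQL
  rw [List.mem_flatMap]
  constructor
  · rintro ⟨p, hp, hc⟩
    rw [PySem.List.mem_enumerate_iff] at hp
    obtain ⟨k, hk, rfl⟩ := hp
    obtain ⟨q, hq, rfl⟩ := List.mem_map.mp hc
    rw [List.mem_filter] at hq
    obtain ⟨hq1, hq2⟩ := hq
    rw [PySem.List.mem_enumerate_iff] at hq1
    obtain ⟨j, hj, rfl⟩ := hq1
    simp only [zero_add] at hq2 ⊢
    rw [decide_eq_true_iff] at hq2
    have hqq := (pvCA_iff_qual m h w hh hw k j hk hj).mp hq2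
    have hwj : ((m[k]'hk).length : Int) = w := hw _ (List.getElem_mem hk)
    have hj' : j < (m[k]'hk).length := hj
    exact ⟨⟨by omega, by omega, by omega, by omega⟩, hqq⟩
  · rintro ⟨⟨c1, c2, c3, c4⟩, hq⟩
    have hk : c.1.toNat < m.length := by omega
    have hwj : ((m[c.1.toNat]'hk).length : Int) = w := hw _ (List.getElem_mem hk)
    have hj : c.2.toNat < (m[c.1.toNat]'hk).length := by omega
    have hc1 : ((c.1.toNat : Nat) : Int) = c.1 := by omega
    have hc2 : ((c.2.toNat : Nat) : Int) = c.2 := by omega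
    refine ⟨(((c.1.toNat : Nat) : Int), m[c.1.toNat]'hk), ?_, ?_⟩
    · rw [PySem.List.mem_enumerate_iff]
      exact ⟨c.1.toNat, hk, by rw [zero_add]⟩
    · apply List.mem_map.mpr
      refine ⟨(((c.2.toNat : Nat) : Int), (m[c.1.toNat]'hk)[c.2.toNat]'hj), ?_, ?_⟩
      · rw [List.mem_filter]
        constructor
        · rw [PySem.List.mem_enumerate_iff]
          exact ⟨c.2.toNat, hj, by rw [zero_add]⟩
        · rw [decide_eq_true_iff]
          apply (pvCA_iff_qual m h w hh hw c.1.toNat c.2.toNat hk hj).mpr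
          rw [hc1, hc2]
          exact hq
      · simp only [hc1, hc2]

-- ---------- characterizing pvGridA entrywise ----------

lemma pvGridA_length (m : List (List Int)) : (pvGridA m).length = m.length := by
  simp [pvGridA, PySem.List.length_enumerate]

lemma pvGridA_row_length (m : List (List Int)) (y : Nat) (hy : y < (pvGridA m).length) :
    ((pvGridA m)[y]'hy).length = (m[y]'(by rw [pvGridA_length] at hy; exact hy)).length := by
  simp [pvGridA, PySem.List.length_enumerate, PySem.List.getElem_enumerate]

lemma pvGridA_entry (m : List (List Int)) (y x : Nat)
    (hy : y < m.length) (hx : x < (m[y]'hy).length)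
    (hy' : y < (pvGridA m).length) (hx' : x < ((pvGridA m)[y]'hy').length) :
    ((pvGridA m)[y]'hy')[x]'hx'
      = if pvCA m (x : Int) (y : Int) ((m[y]'hy)[x]'hx) then 0 else (m[y]'hy)[x]'hx := by
  simp [pvGridA, PySem.List.getElem_enumerate]

lemma pvGridA_pre (m : List (List Int)) (w : Int)
    (hw : ∀ row ∈ m, (row.length : Int) = w) :
    ∀ row ∈ pvGridA m, (row.length : Int) = w := by
  intro r hr
  obtain ⟨y, hy, rfl⟩ := List.getElem_of_mem hr
  rw [pvGridA_row_length]
  exact hw _ (List.getElem_mem _)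

-- ---------- the grid-zeroing fold of B ----------

lemma pvZero_core (L : List (Int × Int)) :
    ∀ (g : List (List Int)), (∀ c ∈ L, 0 ≤ c.1 ∧ 0 ≤ c.2) →
      (pvZero L g).length = g.length ∧
      (∀ y : Nat, ((pvZero L g).getD y []).length = (g.getD y []).length) ∧
      (∀ y x : Nat, ((pvZero L g).getD y []).getD x 0 =
          if ((y : Int), (x : Int)) ∈ L then 0 else (g.getD y []).getD x 0) := by
  induction L with
  | nil => intro g _; refine ⟨rfl, fun y => rfl, fun y x => by simp [pvZero]⟩
  | cons c L ih =>
    intro g hL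
    have hc := hL c (by simp)
    have hstep : pvZero (c :: L) g
        = pvZero L (g.modify c.1.toNat (fun r => r.set c.2.toNat 0)) := by
      simp [pvZero]
    obtain ⟨ihlen, ihrow, ihent⟩ := ih (g.modify c.1.toNat (fun r => r.set c.2.toNat 0))
      (fun d hd => hL d (by simp [hd]))
    rw [hstep]
    have hmodlen : (g.modify c.1.toNat (fun r => r.set c.2.toNat 0)).length = g.length :=
      List.length_modify _ _ _
    have hmodrow : ∀ y : Nat,
        ((g.modify c.1.toNat (fun r => r.set c.2.toNat 0)).getD y [])
          = if c.1.toNat = y then (g.getD y []).set c.2.toNat 0 else g.getD y [] := by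
      intro y
      by_cases hy : y < g.length
      · rw [List.getD_eq_getElem _ _ (by omega), List.getD_eq_getElem _ _ hy,
          List.getElem_modify]
      · rw [List.getD_eq_default _ _ (by omega), List.getD_eq_default _ _ (by omega)]
        simp
    refine ⟨by rw [ihlen, hmodlen], ?_, ?_⟩
    · intro y
      rw [ihrow y, hmodrow y]
      split <;> simp
    · intro y x
      rw [ihent y x, hmodrow y]
      by_cases hmem : ((y : Int), (x : Int)) ∈ c :: L
      · rw [if_pos hmem]
        by_cases hcy : ((y : Int), (x : Int)) ∈ L
        · rw [if_pos hcy]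
        · rw [if_neg hcy]
          have hceq : ((y : Int), (x : Int)) = c := by
            rcases List.mem_cons.mp hmem with h | h
            · exact h
            · exact absurd h hcy
          have h1 : c.1.toNat = y := by rw [← hceq]; simp
          have h2 : c.2.toNat = x := by rw [← hceq]; simp
          rw [if_pos h1, h2]
          by_cases hx : x < (g.getD y []).length
          · rw [List.getD_eq_getElem _ _ (by rw [List.length_set]; exact hx),
              List.getElem_set, if_pos rfl]
          · rw [List.getD_eq_default _ _ (by rw [List.length_set]; omega)]
      · rw [if_neg hmem]
        have hcy : ((y : Int), (x : Int)) ∉ L :=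
          fun hin => hmem (List.mem_cons_of_mem _ hin)
        rw [if_neg hcy]
        have hne : c ≠ ((y : Int), (x : Int)) := by
          intro he
          exact hmem (by rw [he]; exact List.mem_cons_self)
        by_cases hcc : c.1.toNat = y
        · rw [if_pos hcc]
          have hnex : c.2.toNat ≠ x := by
            intro he
            apply hne
            have h1 : c.1 = (y : Int) := by omega
            have h2 : c.2 = (x : Int) := by omega
            exact Prod.ext h1 h2
          by_cases hx : x < (g.getD y []).length
          · rw [List.getD_eq_getElem _ _ (by rw [List.length_set]; exact hx),
              List.getD_eq_getElem _ _ hx, List.getElem_set, if_neg hnex]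
          · rw [List.getD_eq_default _ _ (by rw [List.length_set]; omega),
              List.getD_eq_default _ _ (by omega)]
        · rw [if_neg hcc]

lemma pvZero_pad (L : List (Int × Int)) (g : List (List Int))
    (hL : ∀ c ∈ L, 0 ≤ c.1 ∧ 0 ≤ c.2) (y x : Int) :
    pvPad (pvZero L g) y x = if (y, x) ∈ L then 0 else pvPad g y x := by
  obtain ⟨_, _, hent⟩ := pvZero_core L g hL
  by_cases hpos : 0 ≤ y ∧ 0 ≤ x
  · have key := hent y.toNat x.toNat
    rw [show ((y.toNat : Nat) : Int) = y by omega, show ((x.toNat : Nat) : Int) = x by omega] at key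
    unfold pvPad
    rw [if_pos hpos, if_pos hpos]
    exact key
  · have hnotin : (y, x) ∉ L := by
      intro hin
      have := hL _ hin
      simp only [] at this
      omega
    rw [if_neg hnotin]
    unfold pvPad
    rw [if_neg hpos, if_neg hpos]

lemma pvNeigh_zero_invariant (L : List (Int × Int)) (g : List (List Int))
    (hL : ∀ c ∈ L, 0 ≤ c.1 ∧ 0 ≤ c.2) (y x : Int)
    (hn : ∀ d ∈ pvOffs, (y + d.1, x + d.2) ∉ L) :
    pvNeigh (pvZero L g) y x = pvNeigh g y x := by
  have h1 := hn (-1,-1) (by simp [pvOffs])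
  have h2 := hn (-1,0) (by simp [pvOffs])
  have h3 := hn (-1,1) (by simp [pvOffs])
  have h4 := hn (0,-1) (by simp [pvOffs])
  have h5 := hn (0,1) (by simp [pvOffs])
  have h6 := hn (1,-1) (by simp [pvOffs])
  have h7 := hn (1,0) (by simp [pvOffs])
  have h8 := hn (1,1) (by simp [pvOffs])
  simp only [show y + (-1 : Int) = y - 1 from by ring, show x + (-1 : Int) = x - 1 from by ring,
    show y + (0 : Int) = y from by ring, show x + (0 : Int) = x from by ring] at h1 h2 h3 h4 h5 h6 h7 h8
  unfold pvNeigh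
  rw [pvZero_pad L g hL, pvZero_pad L g hL, pvZero_pad L g hL, pvZero_pad L g hL,
    pvZero_pad L g hL, pvZero_pad L g hL, pvZero_pad L g hL, pvZero_pad L g hL]
  rw [if_neg h1, if_neg h2, if_neg h3, if_neg h5, if_neg h8, if_neg h7, if_neg h6, if_neg h4]

-- ---------- one round of B under the frontier invariants ----------

lemma pvRemoved_mem (grid : List (List Int)) (h w : Int)
    (hh : (grid.length : Int) = h) (hw : ∀ row ∈ grid, (row.length : Int) = w)
    (cand : PySem.Set (Int × Int))
    (hcin : ∀ c ∈ cand, pvInR h w c)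
    (hinv : ∀ c, pvInR h w c → pvQual grid c → c ∈ cand)
    (c : Int × Int) :
    c ∈ pvRemovedB grid h w cand ↔ pvInR h w c ∧ pvQual grid c := by
  unfold pvRemovedB
  rw [List.mem_filter]
  constructor
  · rintro ⟨hc, hp⟩
    have hr := hcin c hc
    exact ⟨hr, (pvPredB_iff grid h w hh hw c hr).mp hp⟩
  · rintro ⟨hr, hq⟩
    exact ⟨hinv c hr hq, (pvPredB_iff grid h w hh hw c hr).mpr hq⟩

lemma pvRemoved_len (grid : List (List Int)) (h w : Int)
    (hh : (grid.length : Int) = h) (hw : ∀ row ∈ grid, (row.length : Int) = w)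
    (cand : PySem.Set (Int × Int)) (hnd : cand.Nodup)
    (hcin : ∀ c ∈ cand, pvInR h w c)
    (hinv : ∀ c, pvInR h w c → pvQual grid c → c ∈ cand) :
    ((pvRemovedB grid h w cand).length : Int) = pvCntA grid := by
  rw [pvQL_len grid]
  congr 1
  apply List.Perm.length_eq
  have hnodR : (pvRemovedB grid h w cand).Nodup := List.Nodup.filter _ hnd
  rw [List.perm_ext_iff_of_nodup hnodR (pvQL_nodup grid)]
  intro c
  rw [pvRemoved_mem grid h w hh hw cand hcin hinv c, pvQL_mem grid h w hh hw c]

lemma pvZero_eq_gridA (grid : List (List Int)) (h w : Int)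
    (hh : (grid.length : Int) = h) (hw : ∀ row ∈ grid, (row.length : Int) = w)
    (cand : PySem.Set (Int × Int))
    (hcin : ∀ c ∈ cand, pvInR h w c)
    (hinv : ∀ c, pvInR h w c → pvQual grid c → c ∈ cand) :
    pvZero (pvRemovedB grid h w cand) grid = pvGridA grid := by
  have hmem := pvRemoved_mem grid h w hh hw cand hcin hinv
  have hLpos : ∀ c ∈ pvRemovedB grid h w cand, 0 ≤ c.1 ∧ 0 ≤ c.2 := by
    intro c hc
    have := (hmem c).mp hc
    exact ⟨this.1.1, this.1.2.2.1⟩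
  obtain ⟨hlen, hrow, hent⟩ := pvZero_core (pvRemovedB grid h w cand) grid hLpos
  apply List.ext_getElem
  · rw [hlen, pvGridA_length]
  intro y hy1 hy2
  have hyg : y < grid.length := by rw [hlen] at hy1; exact hy1
  apply List.ext_getElem
  · have := hrow y
    rw [List.getD_eq_getElem _ _ hy1, List.getD_eq_getElem _ _ hyg] at this
    rw [this, pvGridA_row_length]
  intro x hx1 hx2
  have hxg : x < (grid[y]'hyg).length := by
    have := hrow y
    rw [List.getD_eq_getElem _ _ hy1, List.getD_eq_getElem _ _ hyg] at this
    rw [this] at hx1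
    exact hx1
  have he := hent y x
  rw [List.getD_eq_getElem _ _ hy1, List.getD_eq_getElem _ _ hyg,
    List.getD_eq_getElem _ _ hx1, List.getD_eq_getElem _ _ hxg] at he
  rw [he, pvGridA_entry grid y x hyg hxg]
  have hbr : (((y : Int), (x : Int)) ∈ pvRemovedB grid h w cand)
      ↔ pvCA grid (x : Int) (y : Int) ((grid[y]'hyg)[x]'hxg) := by
    rw [hmem ((y : Int), (x : Int)),
      pvCA_iff_qual grid h w hh hw y x hyg hxg]
    have hwj : ((grid[y]'hyg).length : Int) = w := hw _ (List.getElem_mem hyg)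
    constructor
    · rintro ⟨_, hq⟩; exact hq
    · intro hq
      exact ⟨⟨by omega, by omega, by omega, by omega⟩, hq⟩
  by_cases hin : ((y : Int), (x : Int)) ∈ pvRemovedB grid h w cand
  · rw [if_pos hin, if_pos (hbr.mp hin)]
  · rw [if_neg hin, if_neg (fun hca => hin (hbr.mpr hca))]

lemma pvNextCand_mem (R : List (Int × Int)) (h w : Int) (c : Int × Int) :
    c ∈ pvNextCand R h w
      ↔ ∃ r ∈ R, ∃ d ∈ pvOffs, pvInR h w (r.1 + d.1, r.2 + d.2) ∧ c = (r.1 + d.1, r.2 + d.2) := by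
  unfold pvNextCand
  rw [PySem.Set.mem_ofList, List.mem_flatMap]
  constructor
  · rintro ⟨r, hr, hc⟩
    obtain ⟨d, hd, rfl⟩ := List.mem_map.mp hc
    rw [List.mem_filter] at hd
    obtain ⟨hd1, hd2⟩ := hd
    rw [decide_eq_true_iff] at hd2
    exact ⟨r, hr, d, hd1, hd2, rfl⟩
  · rintro ⟨r, hr, d, hd, hir, rfl⟩
    refine ⟨r, hr, List.mem_map.mpr ⟨d, ?_, rfl⟩⟩
    rw [List.mem_filter]
    exact ⟨hd, decide_eq_true hir⟩

-- the heart: after zeroing this round's removals, every still-qualifying cell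
-- is adjacent to a removal, hence in the next worklist
lemma pv_inv_next (grid : List (List Int)) (h w : Int)
    (hh : (grid.length : Int) = h) (hw : ∀ row ∈ grid, (row.length : Int) = w)
    (cand : PySem.Set (Int × Int))
    (hcin : ∀ c ∈ cand, pvInR h w c)
    (hinv : ∀ c, pvInR h w c → pvQual grid c → c ∈ cand) :
    ∀ c, pvInR h w c → pvQual (pvZero (pvRemovedB grid h w cand) grid) c
      → c ∈ pvNextCand (pvRemovedB grid h w cand) h w := by
  intro c hcr hq
  set R := pvRemovedB grid h w cand with hR
  have hmem := pvRemoved_mem grid h w hh hw cand hcin hinv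
  have hLpos : ∀ e ∈ R, 0 ≤ e.1 ∧ 0 ≤ e.2 := by
    intro e he
    have := (hmem e).mp he
    exact ⟨this.1.1, this.1.2.2.1⟩
  by_contra hnc
  -- c itself was not removed (else its value is now 0)
  have hcnr : c ∉ R := by
    intro hcin'
    have := hq.1
    rw [show c = (c.1, c.2) from rfl] at hcin'
    rw [show pvPad (pvZero R grid) c.1 c.2
        = if (c.1, c.2) ∈ R then 0 else pvPad grid c.1 c.2 from pvZero_pad R grid hLpos c.1 c.2,
      if_pos hcin'] at this
    exact this rfl
  -- no neighbour of c was removed, else c would be in the next worklist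
  have hnn : ∀ d ∈ pvOffs, (c.1 + d.1, c.2 + d.2) ∉ R := by
    intro d hd hin
    apply hnc
    rw [pvNextCand_mem]
    refine ⟨(c.1 + d.1, c.2 + d.2), hin, (-d.1, -d.2), ?_, ?_, ?_⟩
    · fin_cases hd <;> simp [pvOffs]
    · simp only []
      have : (c.1 + d.1 + -d.1, c.2 + d.2 + -d.2) = c := by
        apply Prod.ext <;> simp
      rw [this]
      exact hcr
    · apply Prod.ext <;> simp
  -- so c's value and neighbour sum are unchanged: it qualified already this round
  have hqold : pvQual grid c := by
    constructor
    · have := hq.1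
      rw [show pvPad (pvZero R grid) c.1 c.2
          = if (c.1, c.2) ∈ R then 0 else pvPad grid c.1 c.2 from pvZero_pad R grid hLpos c.1 c.2,
        if_neg (by rw [show (c.1, c.2) = c from rfl]; exact hcnr)] at this
      exact this
    · have := hq.2
      rw [pvNeigh_zero_invariant R grid hLpos c.1 c.2 hnn] at this
      exact this
  exact hcnr ((hmem c).mpr ⟨hcr, hqold⟩)

-- ---------- the two loops agree ----------

lemma pv_loop_eq : ∀ (f : Nat) (grid : List (List Int)) (h w : Int)
    (cand : PySem.Set (Int × Int)) (acc : List Int),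
    (grid.length : Int) = h → (∀ row ∈ grid, (row.length : Int) = w) →
    cand.Nodup → (∀ c ∈ cand, pvInR h w c) →
    (∀ c, pvInR h w c → pvQual grid c → c ∈ cand) →
    pvLoopA f grid acc = pvLoopB f grid h w cand acc := by
  intro f
  induction f with
  | zero => intro grid h w cand acc _ _ _ _ _; rfl
  | succ f ih =>
    intro grid h w cand acc hh hw hnd hcin hinv
    have hlen := pvRemoved_len grid h w hh hw cand hnd hcin hinv
    have hgrid := pvZero_eq_gridA grid h w hh hw cand hcin hinv
    show (let st := pvRoundA grid
          let acc2 := acc ++ [st.1]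
          if st.1 > 0 then pvLoopA f st.2 acc2 else acc2)
        = (let removed := pvRemovedB grid h w cand
           let counts2 := acc ++ [(removed.length : Int)]
           if removed.isEmpty then counts2
           else pvLoopB f (pvZero removed grid) h w (pvNextCand removed h w) counts2)
    simp only [pvRoundA_eq, hlen, hgrid]
    set R := pvRemovedB grid h w cand with hR
    have hemp : R.isEmpty = true ↔ ¬ ((R.length : Int) > 0) := by
      rw [List.isEmpty_iff_length_eq_zero]
      omega
    rw [← hlen]
    by_cases hz : R.isEmpty
    · rw [if_pos hz, if_neg (by rw [← hemp]; exact hz)]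
    · rw [if_neg hz, if_pos (by by_contra hc; exact hz (hemp.mpr hc))]
      rw [← hgrid]
      apply ih
      · rw [hgrid]
        rw [show ((pvGridA grid).length : Int) = (grid.length : Int) from by rw [pvGridA_length]]
        exact hh
      · rw [hgrid]; exact pvGridA_pre grid w hw
      · exact PySem.Set.nodup_ofList _
      · intro c hc
        rw [pvNextCand_mem] at hc
        obtain ⟨r, _, d, _, hir, rfl⟩ := hc
        exact hir
      · exact pv_inv_next grid h w hh hw cand hcin hinv

-- ===== VERDICT (by name: the statement is the Claim_ definition above) =====
theorem count_forkable_rolls_spec : Claim_equal_count_forkable_rolls := by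
  intro m _ hpre
  unfold Spec_count_forkable_rolls count_forkable_rolls count_forkable_rolls_alt
  rw [List.map_id']
  show pvLoopA (pvFuel m) m [] = pvLoopB (pvFuel m) m _ _ _ []
  set w : Int := if m.isEmpty then 0 else ((m.headD []).length : Int) with hwdef
  have hw : ∀ row ∈ m, (row.length : Int) = w := by
    intro r hr
    have hne : m.isEmpty = false := by
      cases m with
      | nil => simp at hr
      | cons a t => rfl
    rw [hwdef]
    simp only [hne, Bool.false_eq_true, if_false]
    exact_mod_cast hpre r hr
  apply pv_loop_eq (pvFuel m) m (m.length : Int) w _ [] rfl hw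
  · exact PySem.Set.nodup_ofList _
  · intro c hc
    rw [PySem.Set.mem_ofList, List.mem_flatMap] at hc
    obtain ⟨y, hy, hc⟩ := hc
    obtain ⟨x, hx, rfl⟩ := List.mem_map.mp hc
    rw [PySem.List.mem_pyRange_one] at hy hx
    exact ⟨hy.1, hy.2, hx.1, hx.2⟩
  · intro c hcr _
    rw [PySem.Set.mem_ofList, List.mem_flatMap]
    refine ⟨c.1, ?_, List.mem_map.mpr ⟨c.2, ?_, rfl⟩⟩
    · rw [PySem.List.mem_pyRange_one]; exact ⟨hcr.1, hcr.2.1⟩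
    · rw [PySem.List.mem_pyRange_one]; exact ⟨hcr.2.2.1, hcr.2.2.2⟩
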